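-- pv_equiv track=rewrite | github.com/hsh5206/Algorithm_python | 프로그래머스/2018 카카오 블라인드 3차/5.py | solution
-- ===== SOURCE A (Python) =====
-- def solution(words):
--     answer = 0
--     for i in range(len(words)):
--         word = words[i]
--         isBreak = False
--         count = 0
--         while True:
--             for j in range(len(words)):
--                 if i == j:
--                     continue
--                 if word in words[j]:
--                     if count != 0:
--                         answer += 1
--                     answer += len(word)
--                     isBreak = True
--                     break
--             if not isBreak:
--                 word = word[:-1]
--                 count += 1
--             else:
--                 break
--     return answer
-- ===== SOURCE B (Python) =====
-- def solution(words):
--     # The predicate "the length-k prefix of w occurs in some other word" is downward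
--     # closed in k, so the longest such prefix is found by binary search on k instead
--     # of A's linear shrink-and-retry loop.
--     total = 0
--     for i, w in enumerate(words):
--         lo, hi = 0, len(w)
--         while lo < hi:
--             mid = (lo + hi + 1) // 2
--             p = w[:mid]
--             if any(j != i and p in words[j] for j in range(len(words))):
--                 lo = mid
--             else:
--                 hi = mid - 1
--         total += lo
--         if lo < len(w):
--             total += 1
--     return total
-- ===== Notes on version B (the rewrite author's own statement) =====
-- stated objective: alternative
-- what changed: A shrinks the word one character at a time, rescanning all other words at each length; B exploits that 'the length-k prefix occurs in another word' is downward-closed in k and finds the longest such prefix by binary search on the prefix length; Pre_ excludes one-element lists, on which A's while-loop never finds a match and diverges.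
-- outside the precondition, e.g. on solution(['ab']): A does not finish within the time limit, B returns 1
import Mathlib
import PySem

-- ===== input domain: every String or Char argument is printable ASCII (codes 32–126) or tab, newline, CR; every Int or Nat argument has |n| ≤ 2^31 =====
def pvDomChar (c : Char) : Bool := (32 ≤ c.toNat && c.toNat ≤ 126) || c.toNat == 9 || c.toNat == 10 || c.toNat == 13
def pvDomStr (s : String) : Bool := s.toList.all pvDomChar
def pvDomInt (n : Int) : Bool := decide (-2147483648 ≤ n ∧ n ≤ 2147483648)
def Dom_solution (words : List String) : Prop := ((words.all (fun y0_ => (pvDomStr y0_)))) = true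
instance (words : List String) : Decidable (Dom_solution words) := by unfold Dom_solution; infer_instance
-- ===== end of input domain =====

-- B finds each word's longest prefix occurring in another word by binary search on the
-- prefix length (the occurrence predicate is downward-closed in the length) instead of
-- A's one-character-at-a-time shrink-and-retry loop; objective: alternative structure,
-- same exact values wherever A terminates.

-- ===== PORT A =====
-- A's inner 'for j' loop: first j ≠ i with word a substring of words[j] exists?
def aFound (words : List String) (i : Nat) (word : String) : Bool :=
  (List.range words.length).any (fun j => decide (j ≠ i) && PySem.Str.isIn word (words.getD j ""))

-- A's 'while True' loop: shrink word until found; Python diverges when word is empty and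
-- not found (only reachable when len(words) = 1, excluded by Pre_); the guard returning 0
-- there only makes the recursion total.
def aLoop (words : List String) (i : Nat) (word : String) (count : Nat) : Int :=
  if aFound words i word then
    (if count ≠ 0 then 1 else 0) + (PySem.Str.len word : Int)
  else if h : word.toList = [] then 0
  else aLoop words i (PySem.Str.slice word none (some (-1))) (count + 1)
termination_by word.toList.length
decreasing_by
  rw [PySem.Str.slice_to_neg_one]
  have : word.toList.length ≠ 0 := fun hh => h (List.eq_nil_of_length_eq_zero hh)
  rw [List.length_dropLast]
  omega

def solution (words : List String) : Int :=
  (List.range words.length).foldl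
    (fun answer i => answer + aLoop words i (words.getD i "") 0) 0

-- ===== PORT B =====
-- the hoisted 'any(j != i and p in words[j] for j in range(len(words)))' of Source B
def bCheck (words : List String) (i : Nat) (w : String) (mid : Nat) : Bool :=
  (List.range words.length).any
    (fun j => decide (j ≠ i) &&
      PySem.Str.isIn (PySem.Str.slice w none (some (mid : Int))) (words.getD j ""))

-- the 'while lo < hi' binary search of Source B (lo, hi stay ≥ 0, so Nat carries them)
def bLoop (words : List String) (i : Nat) (w : String) (lo hi : Nat) : Nat :=
  if lo < hi then
    let mid := (lo + hi + 1) / 2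
    if bCheck words i w mid then bLoop words i w mid hi
    else bLoop words i w lo (mid - 1)
  else lo
termination_by hi - lo
decreasing_by
  · omega
  · omega

def solution_alt (words : List String) : Int :=
  (List.range words.length).foldl
    (fun total i =>
      let w := words.getD i ""
      let lo := bLoop words i w 0 w.toList.length
      total + (lo : Int) + (if lo < w.toList.length then 1 else 0))
    0

-- ===== PRECONDITION & SPEC =====
-- Pre_ excludes exactly the one-element lists: there A's while-loop never finds a match
-- and loops forever on the empty word (A diverges; it returns on every other list).
def Pre_solution (words : List String) : Prop := words.length ≠ 1
instance (words : List String) : Decidable (Pre_solution words) := by unfold Pre_solution; infer_instance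
def pvWitness_solution : List String := (["ab", "abc"])

def Spec_solution (words : List String) (out : Int) : Prop := out = solution_alt words
instance (words : List String) (out : Int) : Decidable (Spec_solution words out) := by unfold Spec_solution; infer_instance

-- ===== CLAIM (what is proved, stated in full; the proofs are below) =====
def Claim_equal_solution : Prop := ∀ (words : List String), Dom_solution words → Pre_solution words → Spec_solution words (solution words)

-- ===== LEMMAS AND PROOFS =====

-- Qb words i wl k : the length-k prefix of wl occurs as a substring of some OTHER word
def Qb (words : List String) (i : Nat) (wl : List Char) (k : Nat) : Bool :=
  (List.range words.length).any
    (fun j => decide (j ≠ i) && PySem.Chars.isIn (wl.take k) (words.getD j "").toList)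

-- greatest k ≤ t whose length-k prefix occurs in another word
def gr (words : List String) (i : Nat) (wl : List Char) (t : Nat) : Nat :=
  Nat.findGreatest (fun k => Qb words i wl k = true) t

lemma Qb_iff (words : List String) (i : Nat) (wl : List Char) (k : Nat) :
    Qb words i wl k = true ↔
      ∃ j, j < words.length ∧ j ≠ i ∧ (wl.take k) <:+: (words.getD j "").toList := by
  simp [Qb, List.any_eq_true, List.mem_range, PySem.Chars.isIn_iff_infix]

lemma aFound_iff (words : List String) (i : Nat) (word : String) :
    aFound words i word = true ↔
      ∃ j, j < words.length ∧ j ≠ i ∧ word.toList <:+: (words.getD j "").toList := by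
  simp [aFound, List.any_eq_true, List.mem_range, PySem.Chars.isIn_iff_infix]

lemma Qb_zero (words : List String) (i : Nat) (wl : List Char)
    (h2 : 2 ≤ words.length) : Qb words i wl 0 = true := by
  rw [Qb_iff]
  by_cases hi : i = 0
  · exact ⟨1, by omega, by omega, by simp [List.nil_infix]⟩
  · exact ⟨0, by omega, fun h => hi h.symm, by simp [List.nil_infix]⟩

lemma aLoop_eq (words : List String) (i : Nat) (wl : List Char)
    (h2 : 2 ≤ words.length) :
    ∀ t, t ≤ wl.length → ∀ (word : String) (count : Nat),
      word.toList = wl.take t →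
      aLoop words i word count =
        (gr words i wl t : Int) +
          (if count = 0 ∧ gr words i wl t = t then 0 else 1) := by
  intro t
  induction t with
  | zero =>
    intro _ word count hw
    have hf : aFound words i word = true := by
      rw [aFound_iff, hw]
      exact (Qb_iff words i wl 0).mp (Qb_zero words i wl h2)
    rw [aLoop, if_pos hf]
    have hlen : PySem.Str.len word = (0 : Int) := by
      rw [PySem.Str.len_eq, hw]; simp
    have hgr : gr words i wl 0 = 0 := Nat.le_zero.mp (Nat.findGreatest_le 0)
    rw [hlen, hgr]
    rcases Nat.eq_zero_or_pos count with hc | hc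
    · simp [hc]
    · have : count ≠ 0 := by omega
      simp [this]
  | succ t ih =>
    intro ht word count hw
    have hwlen : word.toList.length = t + 1 := by
      rw [hw, List.length_take]; omega
    by_cases hQ : Qb words i wl (t + 1) = true
    · have hf : aFound words i word = true := by
        rw [aFound_iff, hw]; exact (Qb_iff words i wl (t+1)).mp hQ
      rw [aLoop, if_pos hf]
      have hgr : gr words i wl (t + 1) = t + 1 :=
        Nat.le_antisymm (Nat.findGreatest_le _) (Nat.le_findGreatest le_rfl hQ)
      have hlen : PySem.Str.len word = ((t + 1 : Nat) : Int) := by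
        rw [PySem.Str.len_eq, hwlen]
      rw [hlen, hgr]
      rcases Nat.eq_zero_or_pos count with hc | hc
      · simp [hc]
      · have : count ≠ 0 := by omega
        rw [if_pos this, if_neg (by simp [this])]
        ring
    · have hf : aFound words i word = false := by
        rw [Bool.eq_false_iff]
        intro hcon
        rw [aFound_iff, hw] at hcon
        exact hQ ((Qb_iff words i wl (t+1)).mpr hcon)
      have hne : word.toList ≠ [] := by
        intro hcon; rw [hcon] at hwlen; simp at hwlen
      rw [aLoop, if_neg (by simp [hf]), dif_neg hne]
      have hslice : (PySem.Str.slice word none (some (-1))).toList = wl.take t := by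
        rw [PySem.Str.slice_to_neg_one, hw, List.dropLast_eq_take, List.length_take,
          List.take_take]
        congr 1
        omega
      rw [ih (by omega) _ (count + 1) hslice]
      have hgr : gr words i wl (t + 1) = gr words i wl t := by
        unfold gr
        rw [Nat.findGreatest_succ, if_neg (by simp [hQ])]
      have hle : gr words i wl t ≤ t := Nat.findGreatest_le t
      rw [hgr]
      have : ¬ (count = 0 ∧ gr words i wl t = t + 1) := by omega
      simp only [Nat.add_eq_zero_iff, one_ne_zero, and_false, false_and, if_false, this]

lemma Qb_mono (words : List String) (i : Nat) (wl : List Char) {k k' : Nat}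
    (hk : k ≤ k') (h : Qb words i wl k' = true) : Qb words i wl k = true := by
  rw [Qb_iff] at h ⊢
  obtain ⟨j, hj, hne, hinf⟩ := h
  refine ⟨j, hj, hne, ?_⟩
  have : wl.take k = (wl.take k').take k := by
    rw [List.take_take]
    congr 1
    omega
  rw [this]
  exact (List.take_prefix k (wl.take k')).isInfix.trans hinf

lemma bCheck_iff (words : List String) (i : Nat) (w : String) (mid : Nat) :
    bCheck words i w mid = true ↔ Qb words i w.toList mid = true := by
  have hsl : (PySem.Str.slice w none (some (mid : Int))).toList = w.toList.take mid := by
    rw [PySem.Str.toList_slice, PySem.Chars.slice_eq_listSlice,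
      PySem.List.slice_to_natCast]
  rw [Qb_iff]
  simp [bCheck, List.any_eq_true, List.mem_range, PySem.Chars.isIn_iff_infix, hsl]

lemma bLoop_eq (words : List String) (i : Nat) (w : String)
    (h2 : 2 ≤ words.length) :
    ∀ d lo hi, hi - lo ≤ d → hi ≤ w.toList.length →
      lo ≤ gr words i w.toList w.toList.length →
      gr words i w.toList w.toList.length ≤ hi →
      bLoop words i w lo hi = gr words i w.toList w.toList.length := by
  set g := gr words i w.toList w.toList.length with hg
  have hQg : Qb words i w.toList g = true := by
    rw [hg]
    unfold gr
    exact @Nat.findGreatest_spec 0 (fun k => Qb words i w.toList k = true) _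
      w.toList.length (Nat.zero_le _) (Qb_zero words i w.toList h2)
  intro d
  induction d with
  | zero =>
    intro lo hi hd hhi hlo hgh
    rw [bLoop, if_neg (by omega)]
    omega
  | succ d ih =>
    intro lo hi hd hhi hlo hgh
    by_cases hlt : lo < hi
    · rw [bLoop, if_pos hlt]
      simp only []
      set mid := (lo + hi + 1) / 2 with hmid
      have hmlo : lo < mid := by omega
      have hmhi : mid ≤ hi := by omega
      by_cases hc : bCheck words i w mid = true
      · rw [if_pos hc]
        have hQm : Qb words i w.toList mid = true := (bCheck_iff words i w mid).mp hc
        have : mid ≤ g := Nat.le_findGreatest (by omega) hQm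
        exact ih mid hi (by omega) hhi this hgh
      · rw [if_neg hc]
        have hgm : g ≤ mid - 1 := by
          by_contra hcon
          have : mid ≤ g := by omega
          exact hc ((bCheck_iff words i w mid).mpr (Qb_mono words i w.toList this hQg))
        exact ih lo (mid - 1) (by omega) (by omega) hlo hgm
    · rw [bLoop, if_neg hlt]
      omega

lemma foldl_congr_pt {F G : Int → Nat → Int} :
    ∀ (l : List Nat) (a : Int), (∀ b j, j ∈ l → F b j = G b j) →
      l.foldl F a = l.foldl G a := by
  intro l
  induction l with
  | nil => intro a _; rfl
  | cons x xs ih =>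
    intro a h
    rw [List.foldl_cons, List.foldl_cons, h a x (by simp)]
    exact ih _ (fun b j hj => h b j (by simp [hj]))

-- ===== VERDICT (by name: the statement is the Claim_ definition above) =====
theorem solution_spec : Claim_equal_solution := by
  intro words _ hpre
  unfold Spec_solution
  rcases Nat.eq_zero_or_pos words.length with h0 | hpos
  · simp [solution, solution_alt, h0]
  · have h2 : 2 ≤ words.length := by
      have : words.length ≠ 1 := hpre
      omega
    unfold solution solution_alt
    apply foldl_congr_pt
    intro a i hi
    simp only []
    set w := words.getD i "" with hw
    rw [aLoop_eq words i w.toList h2 w.toList.length le_rfl _ 0 (by rw [List.take_length]),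
      bLoop_eq words i w h2 w.toList.length 0 w.toList.length (by omega) le_rfl
        (Nat.zero_le _) (Nat.findGreatest_le _)]
    have hle : gr words i w.toList w.toList.length ≤ w.toList.length :=
      Nat.findGreatest_le _
    set g := gr words i w.toList w.toList.length with hg
    by_cases he : g = w.toList.length
    · rw [if_pos ⟨rfl, he⟩, if_neg (by omega)]
      omega
    · rw [if_neg (by tauto), if_pos (by omega)]
      omega
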